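-- pv_equiv track=rewrite | github.com/drhammadkhan/postcode-lookup | generate_map.py | interleaved_order
-- ===== SOURCE A (Python) =====
-- def interleaved_order(n_items):
--     order = []
--     low = 0
--     high = n_items - 1
--     while low <= high:
--         order.append(low)
--         low += 1
--         if low <= high:
--             order.append(high)
--             high -= 1
--     return order
-- ===== SOURCE B (Python) =====
-- def interleaved_order(n_items):
--     return [i // 2 if i % 2 == 0 else n_items - 1 - i // 2 for i in range(n_items)]
-- ===== Notes on version B (the rewrite author's own statement) =====
-- stated objective: simpler
-- what changed: Replaces the two-pointer low/high while loop that marches inward with a one-line comprehension over the output positions, computing each element independently by an even/odd-index closed form instead of maintaining pointer state.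
import Mathlib
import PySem

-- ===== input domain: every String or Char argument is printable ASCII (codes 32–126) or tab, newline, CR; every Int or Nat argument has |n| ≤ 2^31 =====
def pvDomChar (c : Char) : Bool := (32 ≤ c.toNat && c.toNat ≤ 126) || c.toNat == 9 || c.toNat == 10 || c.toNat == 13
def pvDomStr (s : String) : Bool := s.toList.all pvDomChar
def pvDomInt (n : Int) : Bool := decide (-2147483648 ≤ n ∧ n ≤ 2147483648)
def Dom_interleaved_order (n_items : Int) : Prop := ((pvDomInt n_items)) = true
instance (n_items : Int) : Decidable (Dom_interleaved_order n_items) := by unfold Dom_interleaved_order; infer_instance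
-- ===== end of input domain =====

-- B replaces A's two-pointer while loop by a per-position closed form over range(n): simpler, same O(n) cost.

-- ===== PORT A =====
-- the while loop of A: appends low, then (if still low ≤ high) high, marching inward
def pvALoop (low high : Int) : List Int :=
  if _h1 : low ≤ high then
    if _h2 : low + 1 ≤ high then
      low :: high :: pvALoop (low + 1) (high - 1)
    else
      [low]
  else
    []
termination_by (high + 1 - low).toNat
decreasing_by omega

def interleaved_order (n_items : Int) : List Int :=
  pvALoop 0 (n_items - 1)

-- ===== PORT B =====
def interleaved_order_alt (n_items : Int) : List Int :=
  (PySem.List.pyRange 0 n_items 1).map (fun i =>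
    if PySem.Int.mod i 2 = 0 then PySem.Int.floordiv i 2
    else n_items - 1 - PySem.Int.floordiv i 2)

-- ===== PRECONDITION & SPEC =====
def Spec_interleaved_order (n_items : Int) (out : List Int) : Prop := out = interleaved_order_alt n_items
instance (n_items : Int) (out : List Int) : Decidable (Spec_interleaved_order n_items out) := by unfold Spec_interleaved_order; infer_instance

-- ===== CLAIM (what is proved, stated in full; the proofs are below) =====
def Claim_equal_interleaved_order : Prop := ∀ (n_items : Int), Dom_interleaved_order n_items → Spec_interleaved_order n_items (interleaved_order n_items)

-- ===== LEMMAS AND PROOFS =====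

-- closed form of A's loop, over Nat positions
theorem pvALoop_eq (low high : Int) :
    pvALoop low high =
      (List.range (high + 1 - low).toNat).map
        (fun k => if k % 2 = 0 then low + (k / 2 : Nat) else high - (k / 2 : Nat)) := by
  induction low, high using pvALoop.induct with
  | case1 low high h1 h2 ih =>
    rw [pvALoop]
    simp only [h1, h2, dif_pos]
    have hm : (high + 1 - low).toNat = ((high - 1) + 1 - (low + 1)).toNat + 2 := by omega
    rw [hm, ih]
    rw [List.range_succ_eq_map, List.range_succ_eq_map]
    simp only [List.map_cons, List.map_map]
    congr 1
    · norm_num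
    congr 1
    · norm_num
    apply List.map_congr_left
    intro k _
    simp only [Function.comp]
    have h2mod : (k + 1 + 1) % 2 = k % 2 := by omega
    have h2div : (k + 1 + 1) / 2 = k / 2 + 1 := by omega
    rw [h2mod, h2div]
    split_ifs <;> push_cast <;> ring
  | case2 low high h1 h2 =>
    rw [pvALoop]
    simp only [h1, h2, dif_pos]
    have hm : (high + 1 - low).toNat = 1 := by omega
    rw [hm]
    simp
  | case3 low high h1 =>
    rw [pvALoop]
    simp only [h1]
    have hm : (high + 1 - low).toNat = 0 := by omega
    rw [hm]
    simp

theorem interleaved_order_eq_alt (n : Int) : interleaved_order n = interleaved_order_alt n := by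
  rw [interleaved_order, interleaved_order_alt, pvALoop_eq, PySem.List.pyRange_one]
  have hn : (n - 1 + 1 - 0).toNat = (n - 0).toNat := by omega
  rw [hn, List.map_map]
  apply List.map_congr_left
  intro k _
  simp only [Function.comp]
  have hk0 : (0 : Int) ≤ (k : Int) := by positivity
  rw [PySem.Int.mod_eq_emod_of_pos (by norm_num : (0:Int) < 2), PySem.Int.floordiv_eq_ediv_of_pos (by norm_num : (0:Int) < 2)]
  have hmod : ((0 : Int) + k) % 2 = ((k % 2 : Nat) : Int) := by omega
  have hdiv : ((0 : Int) + k) / 2 = ((k / 2 : Nat) : Int) := by omega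
  rw [hmod, hdiv]
  split_ifs with h1 h2 h2
  · simp
  · exfalso; exact h2 (by exact_mod_cast h1)
  · exfalso; apply h1; exact_mod_cast h2
  · rfl

-- ===== VERDICT (by name: the statement is the Claim_ definition above) =====
theorem interleaved_order_spec : Claim_equal_interleaved_order := by
  intro n _
  unfold Spec_interleaved_order
  exact interleaved_order_eq_alt n
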